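-- pv_equiv track=rewrite | github.com/rudder-framework/manifold | prism/signal_states/validation.py | find_natural_cohorts
-- ===== SOURCE A (Python) =====
-- from typing import Dict, List, Tuple, Optional, Any
--
-- def find_natural_cohorts(
--     unit_states: Dict[str, str],
--     min_cohort_size: int = 2
-- ) -> Dict[str, List[str]]:
--     """
--     Discover natural cohorts from state alignment.
--
--     Groups units that share the same state into potential cohorts.
--
--     Args:
--         unit_states: Dict of {unit_id: state_string}
--         min_cohort_size: Minimum members for a valid cohort
--
--     Returns:
--         Dict of {state_string: [unit_ids]}
--     """
--     state_groups: Dict[str, List[str]] = {}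
--
--     for unit_id, state in unit_states.items():
--         if state not in state_groups:
--             state_groups[state] = []
--         state_groups[state].append(unit_id)
--
--     # Filter by minimum size
--     return {
--         state: units
--         for state, units in state_groups.items()
--         if len(units) >= min_cohort_size
--     }
-- ===== SOURCE B (Python) =====
-- def find_natural_cohorts(unit_states, min_cohort_size=2):
--     # Pass 1: frequency table of states; pass 2: build only the large-enough
--     # groups, in the original iteration order.
--     counts = {}
--     for state in unit_states.values():
--         counts[state] = counts.get(state, 0) + 1
--     result = {}
--     for unit_id, state in unit_states.items():
--         if counts[state] >= min_cohort_size: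
--             result.setdefault(state, []).append(unit_id)
--     return result
-- ===== Notes on version B (the rewrite author's own statement) =====
-- stated objective: alternative
-- what changed: B first builds a frequency table of the states and then constructs only the sufficiently common groups in a single conditional second pass, instead of building every group and filtering the finished grouping afterwards.
import Mathlib
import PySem

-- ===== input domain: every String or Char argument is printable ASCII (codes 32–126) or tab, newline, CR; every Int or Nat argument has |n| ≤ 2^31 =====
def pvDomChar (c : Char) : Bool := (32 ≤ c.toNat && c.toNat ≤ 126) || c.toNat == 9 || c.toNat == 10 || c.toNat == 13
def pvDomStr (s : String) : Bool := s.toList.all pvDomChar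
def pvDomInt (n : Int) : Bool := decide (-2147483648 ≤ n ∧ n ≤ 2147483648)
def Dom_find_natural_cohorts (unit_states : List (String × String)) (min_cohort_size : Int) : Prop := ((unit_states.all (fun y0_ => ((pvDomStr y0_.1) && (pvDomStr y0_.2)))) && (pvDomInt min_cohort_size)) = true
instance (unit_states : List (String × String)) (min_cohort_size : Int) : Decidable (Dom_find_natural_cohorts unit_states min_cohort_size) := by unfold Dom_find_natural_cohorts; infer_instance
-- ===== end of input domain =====

-- B builds a frequency table of the states first and then constructs only the
-- sufficiently common groups in one conditional second pass, instead of building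
-- every group and filtering the finished grouping (objective: alternative).

-- ===== PORT A =====
-- for unit_id, state: if state not in state_groups: state_groups[state] = []; state_groups[state].append(unit_id)
-- then {state: units for ... if len(units) >= min_cohort_size}
def find_natural_cohorts (unit_states : List (String × String)) (min_cohort_size : Int) : List (String × List String) :=
  let state_groups : PySem.Dict String (List String) :=
    unit_states.foldl
      (fun d p =>
        (if d.contains p.2 then d else d.insert p.2 []).modify p.2 [] (fun u => u ++ [p.1]))
      PySem.Dict.empty
  state_groups.items.filter (fun p => min_cohort_size ≤ (p.2.length : Int))

-- ===== PORT B =====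
-- pass 1: counts[state] = counts.get(state, 0) + 1
-- pass 2: if counts[state] >= min_cohort_size: result.setdefault(state, []).append(unit_id)
def find_natural_cohorts_alt (unit_states : List (String × String)) (min_cohort_size : Int) : List (String × List String) :=
  let counts : PySem.Dict String Int :=
    (unit_states.map (fun p => p.2)).foldl (fun d s => d.insert s (d.getD s 0 + 1)) PySem.Dict.empty
  let result : PySem.Dict String (List String) :=
    unit_states.foldl
      (fun d p =>
        if min_cohort_size ≤ counts.getD p.2 0 then
          (d.setdefault p.2 []).modify p.2 [] (fun u => u ++ [p.1])
        else d)
      PySem.Dict.empty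
  result.items

-- ===== PRECONDITION & SPEC =====
def Spec_find_natural_cohorts (unit_states : List (String × String)) (min_cohort_size : Int) (out : List (String × List String)) : Prop := out = find_natural_cohorts_alt unit_states min_cohort_size
instance (unit_states : List (String × String)) (min_cohort_size : Int) (out : List (String × List String)) : Decidable (Spec_find_natural_cohorts unit_states min_cohort_size out) := by unfold Spec_find_natural_cohorts; infer_instance

-- ===== CLAIM (what is proved, stated in full; the proofs are below) =====
def Claim_equal_find_natural_cohorts : Prop := ∀ (unit_states : List (String × String)) (min_cohort_size : Int), Dom_find_natural_cohorts unit_states min_cohort_size → Spec_find_natural_cohorts unit_states min_cohort_size (find_natural_cohorts unit_states min_cohort_size)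

-- ===== LEMMAS AND PROOFS =====

-- A's "ensure key, then append" step is one modify (the ensuring insert is absorbed).
theorem pv_stepA (d : PySem.Dict String (List String)) (p : String × String) :
    (if d.contains p.2 then d else d.insert p.2 []).modify p.2 [] (fun u => u ++ [p.1])
      = d.modify p.2 [] (fun u => u ++ [p.1]) := by
  by_cases h : d.contains p.2
  · simp [h]
  · simp only [Bool.not_eq_true] at h
    simp [h, PySem.Dict.modify, PySem.Dict.getD_insert_self, PySem.Dict.insert_insert_self,
      PySem.Dict.getD_of_not_contains _ _ h]

-- B's "setdefault then append" step is one modify.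
theorem pv_stepB (d : PySem.Dict String (List String)) (p : String × String) :
    (d.setdefault p.2 []).modify p.2 [] (fun u => u ++ [p.1])
      = d.modify p.2 [] (fun u => u ++ [p.1]) := by
  by_cases h : d.contains p.2
  · simp [PySem.Dict.setdefault_of_contains _ _ h]
  · simp only [Bool.not_eq_true] at h
    simp [PySem.Dict.setdefault_of_not_contains _ _ h, PySem.Dict.modify,
      PySem.Dict.getD_insert_self, PySem.Dict.insert_insert_self,
      PySem.Dict.getD_of_not_contains _ _ h]

-- a fold whose step fires only when the element passes a test is a fold over the filtered list
theorem pv_foldl_if_filter {α β : Type} (P : α → Prop) [DecidablePred P] (f : β → α → β) (l : List α) (init : β) :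
    l.foldl (fun d x => if P x then f d x else d) init = (l.filter (fun x => decide (P x))).foldl f init := by
  induction l generalizing init with
  | nil => rfl
  | cons a l ih =>
    by_cases h : P a <;> simp [h, ih]

-- ordered dedup commutes with filter
theorem pv_ofList_filter {α : Type} [BEq α] [LawfulBEq α] (q : α → Bool) (xs : List α) :
    PySem.Set.ofList (xs.filter q) = (PySem.Set.ofList xs).filter q := by
  induction xs using List.reverseRecOn with
  | nil => rfl
  | append_singleton xs x ih =>
    by_cases h : q x
    · rw [List.filter_append, List.filter_cons]
      simp only [h, if_pos, List.filter_nil]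
      rw [PySem.Set.ofList_append_singleton, PySem.Set.ofList_append_singleton, ih,
        PySem.Set.add_eq_ite, PySem.Set.add_eq_ite]
      by_cases hm : x ∈ PySem.Set.ofList xs
      · simp [hm, List.mem_filter.mpr ⟨hm, h⟩]
      · have : x ∉ (PySem.Set.ofList xs).filter q := fun hx => hm (List.mem_filter.mp hx).1
        simp [hm, this, List.filter_append, h]
    · simp only [Bool.not_eq_true] at h
      rw [List.filter_append, List.filter_cons]
      simp only [h, if_neg Bool.false_ne_true, List.filter_nil, List.append_nil]
      rw [PySem.Set.ofList_append_singleton, ih, PySem.Set.add_eq_ite]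
      by_cases hm : x ∈ PySem.Set.ofList xs
      · simp [hm]
      · simp [hm, List.filter_append, h]

-- the grouping fold, written over the swapped pairs so the library lemmas apply
theorem pv_group_eq (l : List (String × String)) :
    l.foldl (fun d p => d.modify p.2 [] (fun u => u ++ [p.1])) PySem.Dict.empty
      = (l.map Prod.swap).foldl (fun d p => d.modify p.1 [] (fun u => u ++ [p.2])) PySem.Dict.empty := by
  rw [List.foldl_map]; rfl



theorem pv_swap_filter_map (lst : List (String × String)) (c : String) :
    ((lst.map Prod.swap).filter (fun p => p.1 == c)).map (fun p => p.2)
      = (lst.filter (fun p => p.2 == c)).map (fun p => p.1) := by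
  simp only [List.filter_map, List.map_map]; rfl

-- items of the grouping fold: the distinct states in order, each with its unit ids in order
theorem pv_items (lst : List (String × String)) :
    (lst.foldl (fun d p => d.modify p.2 [] (fun u => u ++ [p.1])) PySem.Dict.empty).items
      = (PySem.Set.ofList (lst.map (fun p => p.2))).map
          (fun k => (k, (lst.filter (fun p => p.2 == k)).map (fun p => p.1))) := by
  have hkeys : (lst.foldl (fun d p => d.modify p.2 [] (fun u => u ++ [p.1])) PySem.Dict.empty).keys
      = PySem.Set.ofList (lst.map (fun p => p.2)) := by
    rw [PySem.Dict.keys_foldl_modify_key lst (fun p => p.2) [] (fun _ p => (fun u => u ++ [p.1])) PySem.Dict.empty]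
    simp [PySem.Set.update_nil_left]
  have hnd : (lst.foldl (fun d p => d.modify p.2 [] (fun u => u ++ [p.1])) PySem.Dict.empty).keys.Nodup := by
    exact PySem.Dict.nodup_keys_foldl_modify_key lst (fun p => p.2) [] (fun _ p => (fun u => u ++ [p.1])) PySem.Dict.empty (by simp)
  rw [PySem.Dict.items_eq_map_keys _ hnd [], hkeys]
  apply List.map_congr_left
  intro k _
  rw [pv_group_eq, PySem.Dict.getD_foldl_modify_append, pv_swap_filter_map]
  simp

theorem pv_grp_len (lst : List (String × String)) (k : String) :
    ((lst.filter (fun p => p.2 == k)).map (fun p => p.1)).length = (lst.map (fun p => p.2)).count k := by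
  rw [List.count_eq_countP, List.countP_map, List.length_map, List.countP_eq_length_filter]
  rfl

theorem pv_counts (ls : List String) (s : String) :
    ((ls.foldl (fun d x => d.insert x (d.getD x 0 + 1)) (PySem.Dict.empty : PySem.Dict String Int)).getD s 0) = (ls.count s : Int) := by
  simp [PySem.Dict.getD_foldl_insert_add_one]

theorem find_natural_cohorts_spec_aux (l : List (String × String)) (m : Int) :
    find_natural_cohorts l m = find_natural_cohorts_alt l m := by
  unfold find_natural_cohorts find_natural_cohorts_alt
  simp only [pv_stepA, pv_stepB, pv_foldl_if_filter, pv_items, pv_counts]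
  have hms : (l.filter (fun x => decide (m ≤ (((l.map (fun p => p.2)).count x.2 : Int))))).map (fun p => p.2)
      = (l.map (fun p => p.2)).filter (fun s => decide (m ≤ (((l.map (fun p => p.2)).count s : Int)))) := by
    rw [List.filter_map]; rfl
  rw [hms, pv_ofList_filter, List.filter_map]
  rw [List.filter_congr (l := PySem.Set.ofList (l.map (fun p => p.2)))
    (q := fun s => decide (m ≤ (((l.map (fun p => p.2)).count s : Int))))
    (fun k _ => by simp only [Function.comp_apply]; rw [pv_grp_len])]
  apply List.map_congr_left
  intro k hk
  have hqk : decide (m ≤ (((l.map (fun p => p.2)).count k : Int))) = true := (List.mem_filter.mp hk).2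
  refine Prod.ext rfl ?_
  simp only []
  rw [List.filter_filter]
  congr 1
  apply List.filter_congr
  intro a _
  by_cases h : a.2 = k
  · rw [h]; simp [hqk]
  · simp [h]

-- ===== VERDICT (by name: the statement is the Claim_ definition above) =====
theorem find_natural_cohorts_spec : Claim_equal_find_natural_cohorts := by
  intro l m _
  exact find_natural_cohorts_spec_aux l m
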